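-- pv_equiv track=rewrite | github.com/kylec43/microminer-query-system-for-cloud | Circular_Shift_Filter.py | _Get_Circular_Shifts
-- ===== SOURCE A (Python) =====
-- def _Get_Circular_Shifts(line):
--
-- 	line = line.strip().split()
--
-- 	i = 0
-- 	while True:
--
-- 		try:
-- 			t = line.index(' ', i)
--
-- 			if t != len(line) - 1:
-- 				if t[i+1] == ' ':
-- 					line.pop(t)
-- 				else:
-- 					i += 1
-- 			else:
-- 				break
--
-- 		except:
--
-- 			break
--
--
-- 	circular_shift_lines = []
--
-- 	i = 0
-- 	while i < len(line):
--
--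
-- 		circular_shift_lines.append(" ".join(line))
--
-- 		temp_line = line[0]
-- 		line.pop(0)
-- 		line.append(temp_line)
--
-- 		i += 1
--
-- 	return circular_shift_lines
-- ===== SOURCE B (Python) =====
-- def _Get_Circular_Shifts(line):
--     words = line.strip().split()
--     n = len(words)
--     doubled = words + words
--     return [" ".join(doubled[i:i+n]) for i in range(n)]
-- ===== Notes on version B (the rewrite author's own statement) =====
-- stated objective: simpler
-- what changed: Removed the dead first loop (it always breaks on its first iteration) and replaced the destructive rotate-pop-append loop with a sliding window over a static doubled word list.
import Mathlib
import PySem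

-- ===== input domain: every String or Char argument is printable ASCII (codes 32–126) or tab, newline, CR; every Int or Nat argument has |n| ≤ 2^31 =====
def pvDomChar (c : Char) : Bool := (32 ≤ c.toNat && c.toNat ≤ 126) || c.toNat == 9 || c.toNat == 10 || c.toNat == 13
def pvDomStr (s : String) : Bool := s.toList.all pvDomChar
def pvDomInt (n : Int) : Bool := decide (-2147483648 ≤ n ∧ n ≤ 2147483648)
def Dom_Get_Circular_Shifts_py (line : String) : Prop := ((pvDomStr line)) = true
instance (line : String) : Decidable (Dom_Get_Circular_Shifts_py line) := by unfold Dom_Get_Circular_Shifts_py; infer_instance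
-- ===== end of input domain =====

-- B drops A's dead first loop and builds the rotations as a sliding window over a doubled
-- word list instead of destructively rotating a mutable list; return value only, A mutates
-- nothing observable (it rebinds its local).

-- ===== PORT A =====
-- second while loop of A: while i < len(line): append " ".join(line); pop front, append it.
-- len(line) is invariant, so the loop runs exactly (initial length) times; the counter is
-- the remaining iteration count.  pop(0)+append(line[0]) = drop 1 ++ take 1 (list nonempty
-- whenever the body runs, since the count never exceeds the length).
def pvALoop : Nat → List String → List String → List String
  | 0, _, acc => acc
  | k + 1, l, acc => pvALoop k (l.drop 1 ++ l.take 1) (acc ++ [PySem.Str.join " " l])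

def Get_Circular_Shifts_py (line : String) : List String :=
  let ws := PySem.Str.split₀ (PySem.Str.strip line)
  -- A's first `while True` loop always breaks during its first iteration: line.index(' ', 0)
  -- raises ValueError when ' ' is absent (always, after split) → except → break; were it found
  -- at t ≠ len-1, t[i+1] indexes an int → TypeError → except → break; at t = len-1 it breaks.
  -- So the loop is a no-op; we evaluate its one index call and discard it.
  let _ := PySem.List.index? ws " "
  pvALoop ws.length ws []

-- ===== PORT B =====
def Get_Circular_Shifts_py_alt (line : String) : List String :=
  let ws := PySem.Str.split₀ (PySem.Str.strip line)
  let n := ws.length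
  let doubled := ws ++ ws
  (PySem.List.pyRange 0 (n : Int) 1).map
    (fun i => PySem.Str.join " " (PySem.List.slice doubled (some i) (some (i + (n : Int)))))

-- ===== PRECONDITION & SPEC =====
def Spec_Get_Circular_Shifts_py (line : String) (out : List String) : Prop := out = Get_Circular_Shifts_py_alt line
instance (line : String) (out : List String) : Decidable (Spec_Get_Circular_Shifts_py line out) := by unfold Spec_Get_Circular_Shifts_py; infer_instance

-- ===== CLAIM (what is proved, stated in full; the proofs are below) =====
def Claim_equal_Get_Circular_Shifts_py : Prop := ∀ (line : String), Dom_Get_Circular_Shifts_py line → Spec_Get_Circular_Shifts_py line (Get_Circular_Shifts_py line)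

-- ===== LEMMAS AND PROOFS =====

-- one rotation step of A's loop
def pvRot (l : List String) : List String := l.drop 1 ++ l.take 1

def pvRotIter : Nat → List String → List String
  | 0, l => l
  | i + 1, l => pvRotIter i (pvRot l)

lemma pvRotIter_succ' (i : Nat) (l : List String) :
    pvRotIter (i + 1) l = pvRot (pvRotIter i l) := by
  induction i generalizing l with
  | zero => rfl
  | succ j ih => exact ih (pvRot l)

lemma pvALoop_eq (k : Nat) (l acc : List String) :
    pvALoop k l acc = acc ++ (List.range k).map (fun i => PySem.Str.join " " (pvRotIter i l)) := by
  induction k generalizing l acc with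
  | zero => simp [pvALoop]
  | succ k ih =>
    rw [pvALoop, ih, List.range_succ_eq_map]
    simp [pvRotIter, pvRot, List.map_map, Function.comp]

lemma pvRotIter_eq_drop_take (ws : List String) :
    ∀ i, i ≤ ws.length → pvRotIter i ws = ws.drop i ++ ws.take i := by
  intro i
  induction i with
  | zero => simp [pvRotIter]
  | succ i ih =>
    intro hi
    have hi' : i < ws.length := by omega
    rw [pvRotIter_succ', ih (by omega), pvRot, List.drop_eq_getElem_cons hi']
    show (List.drop (i+1) ws ++ List.take i ws) ++ [ws[i]] = _
    rw [List.append_assoc, List.take_add_one, List.getElem?_eq_getElem hi']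
    rfl

lemma pvSlice_doubled (ws : List String) (i : Nat) (hi : i ≤ ws.length) :
    PySem.List.slice (ws ++ ws) (some (i : Int)) (some ((i : Int) + (ws.length : Int)))
      = ws.drop i ++ ws.take i := by
  have h1 : (0 : Int) ≤ (i : Int) := by positivity
  have h2 : (0 : Int) ≤ (i : Int) + (ws.length : Int) := by positivity
  rw [PySem.List.slice_toNat _ h1 h2]
  have ht : ((i : Int) + (ws.length : Int)).toNat = i + ws.length := by omega
  have hn : ((i : Int)).toNat = i := by omega
  rw [ht, hn, Nat.add_sub_cancel_left, List.drop_append_of_le_length hi, List.take_append]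
  have hd : (ws.drop i).length = ws.length - i := by simp
  rw [List.take_of_length_le (by omega), hd]
  have h3 : ws.length - (ws.length - i) = i := by omega
  rw [h3]

-- ===== VERDICT (by name: the statement is the Claim_ definition above) =====
theorem Get_Circular_Shifts_py_spec : Claim_equal_Get_Circular_Shifts_py := by
  intro line _
  unfold Spec_Get_Circular_Shifts_py Get_Circular_Shifts_py Get_Circular_Shifts_py_alt
  dsimp only
  set ws := PySem.Str.split₀ (PySem.Str.strip line) with hws
  rw [pvALoop_eq, PySem.List.pyRange_zero_nat, List.map_map]
  simp only [List.nil_append]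
  apply List.map_congr_left
  intro i hi
  have hi' : i < ws.length := List.mem_range.mp hi
  simp only [Function.comp_apply]
  rw [pvRotIter_eq_drop_take ws i (by omega), pvSlice_doubled ws i (by omega)]
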